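-- pv_equiv track=rewrite | github.com/1st-award/codetree-TILs | 240110/야바위/ya-rock.py | solution
-- ===== SOURCE A (Python) =====
-- def solution(N, ya_rock_log):
--     best_score = 0
--     for i in range(1, 4):
--         cups = [0] * 4
--         cups[i] = 1
--         score = 0
--         for a, b, c in ya_rock_log:
--             cups[a], cups[b] = cups[b], cups[a]
--             if cups[c] == 1:
--                 score += 1
--         best_score = max(best_score, score)
--     return best_score
-- ===== SOURCE B (Python) =====
-- def solution(N, ya_rock_log):
--     # One pass: track which starting ball sits under each cup, score all three at once.
--     owner = [0, 1, 2, 3]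
--     scores = [0, 0, 0, 0]
--     for a, b, c in ya_rock_log:
--         owner[a], owner[b] = owner[b], owner[a]
--         ball = owner[c]
--         if ball:
--             scores[ball] += 1
--     return max(scores[1], scores[2], scores[3])
-- ===== Notes on version B (the rewrite author's own statement) =====
-- stated objective: faster
-- what changed: Replaces three separate forward simulations of the log (one per starting cup) by a single pass that tracks the ball-permutation in an owner array and accumulates all three scores at once (one traversal instead of three).
import Mathlib
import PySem

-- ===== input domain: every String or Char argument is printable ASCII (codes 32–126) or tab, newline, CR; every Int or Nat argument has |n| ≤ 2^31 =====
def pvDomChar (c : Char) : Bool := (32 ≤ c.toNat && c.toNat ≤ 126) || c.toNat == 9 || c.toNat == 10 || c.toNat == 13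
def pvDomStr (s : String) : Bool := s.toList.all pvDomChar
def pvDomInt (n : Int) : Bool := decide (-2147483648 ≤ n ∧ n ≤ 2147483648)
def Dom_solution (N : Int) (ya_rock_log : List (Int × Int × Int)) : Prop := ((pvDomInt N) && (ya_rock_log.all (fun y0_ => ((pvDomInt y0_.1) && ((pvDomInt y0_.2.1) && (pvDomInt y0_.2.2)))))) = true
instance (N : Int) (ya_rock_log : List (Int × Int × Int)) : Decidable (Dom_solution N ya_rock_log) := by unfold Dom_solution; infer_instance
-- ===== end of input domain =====

-- B replaces A's three sequential simulations of the log by a single permutation-tracking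
-- pass that scores all three starting cups at once (one traversal of the log instead of three).

-- ===== PORT A =====
-- loop body of A's inner 'for a, b, c in ya_rock_log'
def stepA (st : List Int × Int) (t : Int × Int × Int) : List Int × Int :=
  match st, t with
  | (cups, score), (a, b, c) =>
    let cb := PySem.List.pyGetD cups b 0
    let ca := PySem.List.pyGetD cups a 0
    let cups1 := PySem.List.pySetD (PySem.List.pySetD cups a cb) b ca
    (cups1, if PySem.List.pyGetD cups1 c 0 = 1 then score + 1 else score)

def solution (N : Int) (ya_rock_log : List (Int × Int × Int)) : Int :=
  (PySem.List.pyRange 1 4 1).foldl (fun best_score i =>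
    let cups0 := PySem.List.pySetD [0, 0, 0, 0] i 1
    let r := ya_rock_log.foldl stepA (cups0, 0)
    max best_score r.2) 0

-- ===== PORT B =====
-- loop body of B's single 'for a, b, c in ya_rock_log'
def stepB (st : List Int × List Int) (t : Int × Int × Int) : List Int × List Int :=
  match st, t with
  | (owner, scores), (a, b, c) =>
    let ob := PySem.List.pyGetD owner b 0
    let oa := PySem.List.pyGetD owner a 0
    let owner1 := PySem.List.pySetD (PySem.List.pySetD owner a ob) b oa
    let ball := PySem.List.pyGetD owner1 c 0
    let scores1 := if ball ≠ 0 then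
        PySem.List.pySetD scores ball (PySem.List.pyGetD scores ball 0 + 1)
      else scores
    (owner1, scores1)

def solution_alt (N : Int) (ya_rock_log : List (Int × Int × Int)) : Int :=
  let r := ya_rock_log.foldl stepB ([0, 1, 2, 3], [0, 0, 0, 0])
  max (max (PySem.List.pyGetD r.2 1 0) (PySem.List.pyGetD r.2 2 0)) (PySem.List.pyGetD r.2 3 0)

-- ===== PRECONDITION & SPEC =====
-- A raises IndexError when some logged triple indexes outside the 4-cup list; Pre_ admits
-- exactly the valid Python indices -4 ≤ x < 4 for every component of every triple.
def Pre_solution (N : Int) (ya_rock_log : List (Int × Int × Int)) : Prop :=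
  ∀ t ∈ ya_rock_log, PySem.Raise.InRange 4 t.1 ∧ PySem.Raise.InRange 4 t.2.1 ∧ PySem.Raise.InRange 4 t.2.2
instance (N : Int) (ya_rock_log : List (Int × Int × Int)) : Decidable (Pre_solution N ya_rock_log) := by unfold Pre_solution; infer_instance

def pvWitness_solution : Int × (List (Int × Int × Int)) := (4, [(0, 1, 2), (-1, 2, -4), (1, 1, 0)])

def Spec_solution (N : Int) (ya_rock_log : List (Int × Int × Int)) (out : Int) : Prop := out = solution_alt N ya_rock_log
instance (N : Int) (ya_rock_log : List (Int × Int × Int)) (out : Int) : Decidable (Spec_solution N ya_rock_log out) := by unfold Spec_solution; infer_instance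

-- ===== CLAIM (what is proved, stated in full; the proofs are below) =====
def Claim_equal_solution : Prop := ∀ (N : Int) (ya_rock_log : List (Int × Int × Int)), Dom_solution N ya_rock_log → Pre_solution N ya_rock_log → Spec_solution N ya_rock_log (solution N ya_rock_log)

-- ===== LEMMAS AND PROOFS =====

def nidx (i : Int) : Nat := (if i < 0 then i + 4 else i).toNat

theorem pyIdx4 (i : Int) (h : PySem.Raise.InRange 4 i) :
    PySem.List.pyIdx? 4 i = some (nidx i) := by
  obtain ⟨h1, h2⟩ := h
  simp only [PySem.List.pyIdx?, nidx]
  split_ifs <;> first | (congr 1; omega) | rfl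

theorem getD4 (l : List Int) (i d : Int) (hl : l.length = 4) (h : PySem.Raise.InRange 4 i) :
    PySem.List.pyGetD l i d = l.getD (nidx i) d := by
  simp [PySem.List.pyGetD, PySem.List.pyGet?, hl, pyIdx4 i h, List.getD_eq_getElem?_getD]

theorem setD4 (l : List Int) (i v : Int) (hl : l.length = 4) (h : PySem.Raise.InRange 4 i) :
    PySem.List.pySetD l i v = l.set (nidx i) v := by
  simp [PySem.List.pySetD, PySem.List.pySet?, hl, pyIdx4 i h]

theorem nidx_lt (i : Int) (h : PySem.Raise.InRange 4 i) : nidx i < 4 := by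
  obtain ⟨h1, h2⟩ := h; simp only [nidx]; split_ifs <;> omega

theorem nidx_nonneg_eq (i : Int) (h0 : 0 ≤ i) : nidx i = i.toNat := by
  simp only [nidx]; split_ifs <;> omega

theorem getD_set4 (l : List Int) (n m : Nat) (v d : Int) (hn : n < l.length) :
    (l.set n v).getD m d = if m = n then v else l.getD m d := by
  simp only [List.getD_eq_getElem?_getD, List.getElem?_set]
  by_cases h : m = n
  · simp [h, hn]
  · simp [h, Ne.symm h]

-- invariant tying one of A's simulations (starting cup i) to B's combined state
def SimInv (i : Int) (cups : List Int) (score : Int) (owner scores : List Int) : Prop :=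
  cups.length = 4 ∧ owner.length = 4 ∧ scores.length = 4 ∧ 0 ≤ score ∧
  (∀ j, j < 4 → cups.getD j 0 = if owner.getD j 0 = i then 1 else 0) ∧
  (∀ j, j < 4 → 0 ≤ owner.getD j 0 ∧ owner.getD j 0 < 4) ∧
  score = scores.getD i.toNat 0

theorem step_inv (i : Int) (hi : 1 ≤ i ∧ i ≤ 3) (t : Int × Int × Int)
    (ht : PySem.Raise.InRange 4 t.1 ∧ PySem.Raise.InRange 4 t.2.1 ∧ PySem.Raise.InRange 4 t.2.2)
    (cups : List Int) (score : Int) (owner scores : List Int)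
    (h : SimInv i cups score owner scores) :
    SimInv i (stepA (cups, score) t).1 (stepA (cups, score) t).2
          (stepB (owner, scores) t).1 (stepB (owner, scores) t).2 := by
  obtain ⟨a, b, c⟩ := t
  obtain ⟨ha, hb, hc⟩ := ht
  obtain ⟨hcl, hol, hsl, hs0, hind, hrng, hsc⟩ := h
  have hna := nidx_lt a ha
  have hnb := nidx_lt b hb
  have hnc := nidx_lt c hc
  simp only [stepA, stepB]
  rw [getD4 _ _ _ hcl hb, getD4 _ _ _ hcl ha, setD4 _ _ _ hcl ha,
      getD4 _ _ _ hol hb, getD4 _ _ _ hol ha, setD4 _ _ _ hol ha]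
  rw [setD4 _ _ _ (by simpa using hcl) hb, setD4 _ _ _ (by simpa using hol) hb]
  set cups1 := (cups.set (nidx a) (cups.getD (nidx b) 0)).set (nidx b) (cups.getD (nidx a) 0) with hcups1
  set owner1 := (owner.set (nidx a) (owner.getD (nidx b) 0)).set (nidx b) (owner.getD (nidx a) 0) with howner1
  have hcl1 : cups1.length = 4 := by simpa [hcups1] using hcl
  have hol1 : owner1.length = 4 := by simpa [howner1] using hol
  rw [getD4 _ _ _ hcl1 hc, getD4 _ _ _ hol1 hc]
  -- pointwise description of the swapped lists
  have hcup1 : ∀ j, j < 4 → cups1.getD j 0 =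
      if j = nidx b then cups.getD (nidx a) 0 else if j = nidx a then cups.getD (nidx b) 0 else cups.getD j 0 := by
    intro j hj
    rw [hcups1, getD_set4 _ _ _ _ _ (by simpa [hcl] using hnb), getD_set4 _ _ _ _ _ (by omega)]
  have hown1 : ∀ j, j < 4 → owner1.getD j 0 =
      if j = nidx b then owner.getD (nidx a) 0 else if j = nidx a then owner.getD (nidx b) 0 else owner.getD j 0 := by
    intro j hj
    rw [howner1, getD_set4 _ _ _ _ _ (by simpa [hol] using hnb), getD_set4 _ _ _ _ _ (by omega)]
  have hind1 : ∀ j, j < 4 → cups1.getD j 0 = if owner1.getD j 0 = i then 1 else 0 := by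
    intro j hj
    rw [hcup1 j hj, hown1 j hj]
    split_ifs <;> simp_all
  have hrng1 : ∀ j, j < 4 → 0 ≤ owner1.getD j 0 ∧ owner1.getD j 0 < 4 := by
    intro j hj
    rw [hown1 j hj]
    split_ifs <;> [exact hrng _ hna; exact hrng _ hnb; exact hrng _ hj]
  have hball := hrng1 (nidx c) hnc
  have hballR : PySem.Raise.InRange 4 (owner1.getD (nidx c) 0) := by
    constructor <;> [omega; exact_mod_cast hball.2]
  rw [getD4 _ _ _ hsl hballR, setD4 _ _ _ hsl hballR,
      nidx_nonneg_eq _ hball.1]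
  have hblt : (owner1.getD (nidx c) 0).toNat < scores.length := by rw [hsl]; omega
  have hcond : cups1.getD (nidx c) 0 = 1 ↔ owner1.getD (nidx c) 0 = i := by
    rw [hind1 (nidx c) hnc]
    split_ifs with hcc
    · exact iff_of_true rfl hcc
    · exact iff_of_false (by decide) hcc
  refine ⟨hcl1, hol1, ?_, ?_, hind1, hrng1, ?_⟩
  · split_ifs <;> simpa using hsl
  · split_ifs <;> omega
  · by_cases hoi : owner1.getD (nidx c) 0 = i
    · have hA : cups1.getD (nidx c) 0 = 1 := hcond.mpr hoi
      have hbz : owner1.getD (nidx c) 0 ≠ 0 := by omega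
      rw [if_pos hA, if_pos hbz, getD_set4 _ _ _ _ _ hblt,
          if_pos (by omega : i.toNat = (owner1.getD (nidx c) 0).toNat), hsc]
      congr 2
      omega
    · have hA : ¬ cups1.getD (nidx c) 0 = 1 := fun hh => hoi (hcond.mp hh)
      rw [if_neg hA]
      by_cases hbz : owner1.getD (nidx c) 0 = 0
      · rw [if_neg (not_not_intro hbz)]
        exact hsc
      · rw [if_pos hbz, getD_set4 _ _ _ _ _ hblt,
            if_neg (by omega : ¬ i.toNat = (owner1.getD (nidx c) 0).toNat)]
        exact hsc

theorem fold_inv (ya_rock_log : List (Int × Int × Int))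
    (hp : ∀ t ∈ ya_rock_log, PySem.Raise.InRange 4 t.1 ∧ PySem.Raise.InRange 4 t.2.1 ∧ PySem.Raise.InRange 4 t.2.2)
    (i : Int) (hi : 1 ≤ i ∧ i ≤ 3) :
    ∀ cups score owner scores, SimInv i cups score owner scores →
      SimInv i (ya_rock_log.foldl stepA (cups, score)).1 (ya_rock_log.foldl stepA (cups, score)).2
            (ya_rock_log.foldl stepB (owner, scores)).1 (ya_rock_log.foldl stepB (owner, scores)).2 := by
  induction ya_rock_log with
  | nil => intro cups score owner scores h; simpa using h
  | cons t ts ih =>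
    intro cups score owner scores h
    have ht := hp t (by simp)
    have h1 := step_inv i hi t ht cups score owner scores h
    have hp' : ∀ t ∈ ts, PySem.Raise.InRange 4 t.1 ∧ PySem.Raise.InRange 4 t.2.1 ∧ PySem.Raise.InRange 4 t.2.2 := by
      intro u hu; exact hp u (by simp [hu])
    have := ih hp' (stepA (cups, score) t).1 (stepA (cups, score) t).2
      (stepB (owner, scores) t).1 (stepB (owner, scores) t).2 h1
    simpa using this

-- ===== VERDICT (by name: the statement is the Claim_ definition above) =====
theorem solution_spec : Claim_equal_solution := by
  intro N ya_rock_log _ hpre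
  unfold Spec_solution solution solution_alt
  have hrange : PySem.List.pyRange 1 4 1 = [1, 2, 3] := by decide
  rw [hrange]
  simp only [List.foldl]
  set rB := ya_rock_log.foldl stepB ([0, 1, 2, 3], [0, 0, 0, 0]) with hrB
  have init1 : SimInv 1 [0, 1, 0, 0] 0 [0, 1, 2, 3] [0, 0, 0, 0] := by
    refine ⟨rfl, rfl, rfl, le_refl 0, ?_, ?_, rfl⟩ <;> decide
  have init2 : SimInv 2 [0, 0, 1, 0] 0 [0, 1, 2, 3] [0, 0, 0, 0] := by
    refine ⟨rfl, rfl, rfl, le_refl 0, ?_, ?_, rfl⟩ <;> decide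
  have init3 : SimInv 3 [0, 0, 0, 1] 0 [0, 1, 2, 3] [0, 0, 0, 0] := by
    refine ⟨rfl, rfl, rfl, le_refl 0, ?_, ?_, rfl⟩ <;> decide
  have h1 := fold_inv ya_rock_log hpre 1 (by omega) [0, 1, 0, 0] 0 [0, 1, 2, 3] [0, 0, 0, 0] init1
  have h2 := fold_inv ya_rock_log hpre 2 (by omega) [0, 0, 1, 0] 0 [0, 1, 2, 3] [0, 0, 0, 0] init2
  have h3 := fold_inv ya_rock_log hpre 3 (by omega) [0, 0, 0, 1] 0 [0, 1, 2, 3] [0, 0, 0, 0] init3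
  rw [← hrB] at h1 h2 h3
  obtain ⟨-, -, hsl, hs1pos, -, -, hs1⟩ := h1
  obtain ⟨-, -, -, hs2pos, -, -, hs2⟩ := h2
  obtain ⟨-, -, -, hs3pos, -, -, hs3⟩ := h3
  have e1 : PySem.List.pySetD [0, 0, 0, 0] 1 1 = ([0, 1, 0, 0] : List Int) := by decide
  have e2 : PySem.List.pySetD [0, 0, 0, 0] 2 1 = ([0, 0, 1, 0] : List Int) := by decide
  have e3 : PySem.List.pySetD [0, 0, 0, 0] 3 1 = ([0, 0, 0, 1] : List Int) := by decide
  rw [e1, e2, e3]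
  rw [getD4 _ _ _ hsl (by constructor <;> omega), getD4 _ _ _ hsl (by constructor <;> omega),
      getD4 _ _ _ hsl (by constructor <;> omega)]
  have n1 : nidx 1 = 1 := by decide
  have n2 : nidx 2 = 2 := by decide
  have n3 : nidx 3 = 3 := by decide
  rw [n1, n2, n3]
  simp only [Int.toNat_one] at hs1
  have t2 : (2 : Int).toNat = 2 := by decide
  have t3 : (3 : Int).toNat = 3 := by decide
  rw [t2] at hs2; rw [t3] at hs3
  rw [← hs1, ← hs2, ← hs3]
  omega
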